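-- pv_equiv track=rewrite | github.com/pypi-data/pypi-mirror-63 | packages/dslgtool/dslgtool-1.0.0.tar.gz/dslgtool-1.0.0/dslgtool/__main__.py | get_32_length_key_from_passphrase
-- ===== SOURCE A (Python) =====
-- def get_32_length_key_from_passphrase(passphrase):
--     if len(passphrase) == 32:
--         return passphrase
--     else:
--         tmp = passphrase
--         key = ''
--         while len(key) < 32:
--             key += tmp + '-'
--             tmp = tmp[::-1]
--         return key[:32][::-1]
-- ===== SOURCE B (Python) =====
-- def get_32_length_key_from_passphrase(passphrase):
--     if len(passphrase) == 32:
--         return passphrase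
--     base = passphrase + '-' + passphrase[::-1] + '-'
--     return (base * 32)[:32][::-1]
-- ===== Notes on version B (the rewrite author's own statement) =====
-- stated objective: simpler
-- what changed: Replaces the while-loop with alternating tmp reversal by a closed-form string repetition: the loop's output is the prefix of (passphrase + '-' + reversed + '-') repeated, so B returns (base * 32)[:32][::-1] directly.
import Mathlib
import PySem

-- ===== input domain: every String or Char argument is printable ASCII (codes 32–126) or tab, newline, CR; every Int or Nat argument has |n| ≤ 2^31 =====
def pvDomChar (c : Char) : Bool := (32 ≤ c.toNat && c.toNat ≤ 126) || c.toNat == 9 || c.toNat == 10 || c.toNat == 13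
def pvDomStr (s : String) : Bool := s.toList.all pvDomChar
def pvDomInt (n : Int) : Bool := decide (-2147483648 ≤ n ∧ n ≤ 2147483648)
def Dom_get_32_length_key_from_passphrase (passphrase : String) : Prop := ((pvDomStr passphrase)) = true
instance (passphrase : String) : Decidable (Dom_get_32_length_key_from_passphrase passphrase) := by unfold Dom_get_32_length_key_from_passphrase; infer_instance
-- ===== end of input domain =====

-- B replaces A's while-loop (alternating tmp reversal) by the closed-form repetition of the block it emits; objective: simpler.

-- ===== PORT A =====
-- A's while loop: key += tmp + '-'; tmp = tmp[::-1]; stop when len(key) >= 32.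
-- Ported over List Char; tmp[::-1] is List.reverse, key[:32] is List.take 32 (nonnegative bounds).
def pvLoopA (tmp key : List Char) : List Char :=
  if key.length < 32 then pvLoopA tmp.reverse (key ++ tmp ++ ['-'])
  else key
termination_by 32 - key.length
decreasing_by simp_all; omega

def get_32_length_key_from_passphrase (passphrase : String) : String :=
  if passphrase.toList.length = 32 then passphrase
  else String.ofList ((pvLoopA passphrase.toList []).take 32).reverse

-- ===== PORT B =====
-- base = passphrase + '-' + passphrase[::-1] + '-'; return (base * 32)[:32][::-1]
def get_32_length_key_from_passphrase_alt (passphrase : String) : String :=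
  if passphrase.toList.length = 32 then passphrase
  else
    let base := passphrase.toList ++ ['-'] ++ passphrase.toList.reverse ++ ['-']
    String.ofList (((List.replicate 32 base).flatten).take 32).reverse

-- ===== PRECONDITION & SPEC =====
def Spec_get_32_length_key_from_passphrase (passphrase : String) (out : String) : Prop := out = get_32_length_key_from_passphrase_alt passphrase
instance (passphrase : String) (out : String) : Decidable (Spec_get_32_length_key_from_passphrase passphrase out) := by unfold Spec_get_32_length_key_from_passphrase; infer_instance

-- ===== CLAIM (what is proved, stated in full; the proofs are below) =====
def Claim_equal_get_32_length_key_from_passphrase : Prop := ∀ (passphrase : String), Dom_get_32_length_key_from_passphrase passphrase → Spec_get_32_length_key_from_passphrase passphrase (get_32_length_key_from_passphrase passphrase)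

-- ===== LEMMAS AND PROOFS =====

-- Shift lemma: pulling one half-block in front of n repetitions of the reversed-first block
-- equals n repetitions of the original block followed by that half-block.
theorem pv_shift (t : List Char) (n : Nat) :
    t ++ ['-'] ++ (List.replicate n (t.reverse ++ ['-'] ++ t ++ ['-'])).flatten
    = (List.replicate n (t ++ ['-'] ++ t.reverse ++ ['-'])).flatten ++ (t ++ ['-']) := by
  induction n with
  | zero => simp
  | succ n ih =>
    simp only [List.replicate_succ, List.flatten_cons, ← List.append_assoc]
    calc t ++ ['-'] ++ t.reverse ++ ['-'] ++ t ++ ['-'] ++ (List.replicate n (t.reverse ++ ['-'] ++ t ++ ['-'])).flatten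
        = (t ++ ['-'] ++ t.reverse ++ ['-']) ++ (t ++ ['-'] ++ (List.replicate n (t.reverse ++ ['-'] ++ t ++ ['-'])).flatten) := by
          simp [List.append_assoc]
      _ = (t ++ ['-'] ++ t.reverse ++ ['-']) ++ ((List.replicate n (t ++ ['-'] ++ t.reverse ++ ['-'])).flatten ++ (t ++ ['-'])) := by
          rw [ih]
      _ = _ := by simp [List.append_assoc]

theorem pv_flatten_len (t : List Char) : 32 ≤ ((List.replicate 32 (t ++ ['-'] ++ t.reverse ++ ['-'])).flatten).length := by
  simp
  omega

-- Loop characterisation: the first 32 chars of the loop result are the first 32 chars of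
-- key followed by 32 repetitions of the emitted block.
theorem pvLoopA_take (tmp key : List Char) :
    (pvLoopA tmp key).take 32
    = (key ++ (List.replicate 32 (tmp ++ ['-'] ++ tmp.reverse ++ ['-'])).flatten).take 32 := by
  induction tmp, key using pvLoopA.induct with
  | case1 tmp key h ih =>
    rw [List.unattach_reverse, List.unattach_attach] at ih
    rw [pvLoopA, if_pos h, ih]
    have := pv_shift tmp 32
    simp only [List.reverse_reverse] at this ⊢
    rw [List.append_assoc, List.append_assoc, ← List.append_assoc tmp, this]
    rw [← List.append_assoc, List.take_append]
    have hlen := pv_flatten_len tmp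
    have : 32 - (key ++ (List.replicate 32 (tmp ++ ['-'] ++ tmp.reverse ++ ['-'])).flatten).length = 0 := by
      simp; omega
    rw [this]
    simp
  | case2 tmp key h =>
    rw [pvLoopA, if_neg h]
    rw [List.take_append]
    have : (32 : Nat) - key.length = 0 := by omega
    rw [this]
    simp

-- ===== VERDICT (by name: the statement is the Claim_ definition above) =====
theorem get_32_length_key_from_passphrase_spec : Claim_equal_get_32_length_key_from_passphrase := by
  intro p _
  unfold Spec_get_32_length_key_from_passphrase get_32_length_key_from_passphrase get_32_length_key_from_passphrase_alt
  split
  · rfl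
  · rw [pvLoopA_take]
    simp
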